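-- pv_equiv track=rewrite | github.com/jvdub/councilsense | backend/src/councilsense/app/local_pipeline.py | _is_low_value_summary_sentence
-- ===== SOURCE A (Python) =====
-- _MEETING_OPERATIONS_MARKERS: tuple[str, ...] = (
--     "roll call",
--     "call to order",
--     "pledge of allegiance",
--     "present electronically",
--     "joined the meeting",
--     "was excused",
--     "mayor pro tempore",
--     "council chambers",
--     "city recorder",
--     "attendance",
-- )
--
-- def _is_low_signal_sentence(sentence: str) -> bool:
--     lower = sentence.lower()
--     low_signal_markers = (
--         "elected officials present",
--         "city staff present",
--         "present electronically",
--         "council chambers",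
--         "page ",
--         "city recorder",
--         "recording of the discussion can be found",
--         "parcel number",
--         "is located directly",
--     )
--     if any(marker in lower for marker in low_signal_markers):
--         return True
--     if _is_meeting_operations_sentence(sentence):
--         return True
--     if len(sentence) > 220 and ";" in sentence:
--         return True
--     return False
--
-- def _is_meeting_operations_sentence(sentence: str) -> bool:
--     lower = sentence.lower()
--     return any(marker in lower for marker in _MEETING_OPERATIONS_MARKERS)
--
-- def _is_low_value_summary_sentence(sentence: str) -> bool:
--     lower = sentence.lower()
--     if _is_low_signal_sentence(sentence) or _is_low_value_outcome(sentence):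
--         return True
--     low_value_markers = (
--         "recording of the discussion can be found",
--         "recording of the motion can be found",
--         "seconded the motion",
--         "the motion passed with",
--     )
--     if any(marker in lower for marker in low_value_markers):
--         return True
--     if lower.count(" yes") >= 2 or lower.count(" no") >= 2:
--         return True
--     return False
--
-- def _is_low_value_outcome(sentence: str) -> bool:
--     lower = sentence.lower()
--     markers = (
--         "is located directly",
--         "parcel number",
--         "recording of the discussion can be found",
--         "recording of the motion can be found",
--         "joined the meeting",
--         "was excused",
--         "roll call",
--         "call to order",
--         "pledge of allegiance",
--         "mayor pro tempore",
--         "the motion passed with",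
--     )
--     if any(marker in lower for marker in markers):
--         return True
--     if lower.count(" yes") >= 2 or lower.count(" no") >= 2:
--         return True
--     return False
-- ===== SOURCE B (Python) =====
-- # All substring markers A's three helpers test, indexed by their first character,
-- # so one left-to-right scan of the sentence tries only the candidates that can start there.
-- _LOW_VALUE_MARKERS_BY_FIRST_CHAR = {
--     "e": ("elected officials present",),
--     "c": ("city staff present", "council chambers", "city recorder", "call to order"),
--     "p": ("present electronically", "page ", "parcel number", "pledge of allegiance"),
--     "r": ("recording of the discussion can be found", "roll call", "recording of the motion can be found"),
--     "i": ("is located directly",),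
--     "j": ("joined the meeting",),
--     "w": ("was excused",),
--     "m": ("mayor pro tempore",),
--     "a": ("attendance",),
--     "s": ("seconded the motion",),
--     "t": ("the motion passed with",),
-- }
--
-- def _is_low_value_summary_sentence(sentence: str) -> bool:
--     lower = sentence.lower()
--     for i in range(len(lower)):
--         for marker in _LOW_VALUE_MARKERS_BY_FIRST_CHAR.get(lower[i], ()):
--             if lower.startswith(marker, i):
--                 return True
--     return (
--         (len(sentence) > 220 and ";" in sentence)
--         or lower.count(" yes") >= 2
--         or lower.count(" no") >= 2
--     )
-- ===== Notes on version B (the rewrite author's own statement) =====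
-- stated objective: alternative
-- what changed: Replaced the three helper functions doing per-marker whole-string substring membership passes (with duplicated marker lists and a twice-evaluated vote-count gate) by a single left-to-right scan of the lowered sentence that, at each position, tries only the markers indexed under that position's character in a precomputed first-character dict, plus each of the two non-substring gates tested exactly once.
import Mathlib
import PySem

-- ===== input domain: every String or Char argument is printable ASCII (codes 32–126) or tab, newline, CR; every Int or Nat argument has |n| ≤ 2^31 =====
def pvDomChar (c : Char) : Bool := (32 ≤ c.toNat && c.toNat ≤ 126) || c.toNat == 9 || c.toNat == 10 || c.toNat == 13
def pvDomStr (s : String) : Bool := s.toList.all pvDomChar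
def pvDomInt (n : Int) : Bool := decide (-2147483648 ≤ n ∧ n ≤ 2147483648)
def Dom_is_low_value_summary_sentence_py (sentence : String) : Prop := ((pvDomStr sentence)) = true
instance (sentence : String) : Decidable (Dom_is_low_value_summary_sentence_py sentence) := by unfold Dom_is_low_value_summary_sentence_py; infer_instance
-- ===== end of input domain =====

-- B replaces A's per-marker substring passes across three helpers by a single left-to-right
-- scan of the lowered sentence with a first-character index of all markers (simpler decomposition).

-- ===== PORT A =====
def pvMeetingOperationsMarkers : List String :=
  ["roll call", "call to order", "pledge of allegiance", "present electronically",
   "joined the meeting", "was excused", "mayor pro tempore", "council chambers",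
   "city recorder", "attendance"]

def pvIsMeetingOperationsSentence (sentence : String) : Bool :=
  let lower := PySem.Str.lower sentence
  pvMeetingOperationsMarkers.any (fun marker => PySem.Str.isIn marker lower)

def pvIsLowSignalSentence (sentence : String) : Bool :=
  let lower := PySem.Str.lower sentence
  let low_signal_markers : List String :=
    ["elected officials present", "city staff present", "present electronically",
     "council chambers", "page ", "city recorder",
     "recording of the discussion can be found", "parcel number", "is located directly"]
  if low_signal_markers.any (fun marker => PySem.Str.isIn marker lower) then true
  else if pvIsMeetingOperationsSentence sentence then true
  else if PySem.Str.len sentence > 220 && PySem.Str.isIn ";" sentence then true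
  else false

def pvIsLowValueOutcome (sentence : String) : Bool :=
  let lower := PySem.Str.lower sentence
  let markers : List String :=
    ["is located directly", "parcel number", "recording of the discussion can be found",
     "recording of the motion can be found", "joined the meeting", "was excused",
     "roll call", "call to order", "pledge of allegiance", "mayor pro tempore",
     "the motion passed with"]
  if markers.any (fun marker => PySem.Str.isIn marker lower) then true
  else if PySem.Str.count lower " yes" ≥ 2 || PySem.Str.count lower " no" ≥ 2 then true
  else false

def is_low_value_summary_sentence_py (sentence : String) : Bool :=
  let lower := PySem.Str.lower sentence
  if pvIsLowSignalSentence sentence || pvIsLowValueOutcome sentence then true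
  else
    let low_value_markers : List String :=
      ["recording of the discussion can be found", "recording of the motion can be found",
       "seconded the motion", "the motion passed with"]
    if low_value_markers.any (fun marker => PySem.Str.isIn marker lower) then true
    else if PySem.Str.count lower " yes" ≥ 2 || PySem.Str.count lower " no" ≥ 2 then true
    else false

-- ===== PORT B =====
-- the dict literal _LOW_VALUE_MARKERS_BY_FIRST_CHAR of Source B (keys are 1-char strings = Char)
def pvMarkersByFirst : PySem.Dict Char (List String) :=
  PySem.Dict.mk
    [('e', ["elected officials present"]),
     ('c', ["city staff present", "council chambers", "city recorder", "call to order"]),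
     ('p', ["present electronically", "page ", "parcel number", "pledge of allegiance"]),
     ('r', ["recording of the discussion can be found", "roll call", "recording of the motion can be found"]),
     ('i', ["is located directly"]),
     ('j', ["joined the meeting"]),
     ('w', ["was excused"]),
     ('m', ["mayor pro tempore"]),
     ('a', ["attendance"]),
     ('s', ["seconded the motion"]),
     ('t', ["the motion passed with"])]

def is_low_value_summary_sentence_py_alt (sentence : String) : Bool :=
  let lower := PySem.Str.lower sentence
  let lo := lower.toList
  -- 'lower[i]' with i in range(len(lower)) is pyGetD; 'lower.startswith(marker, i)' with
  -- 0 ≤ i ≤ len is exact as isPrefixOf of the drop; the for/return-True loop is an early-exit any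
  if (PySem.List.pyRange 0 lo.length 1).any (fun i =>
       (pvMarkersByFirst.getD (PySem.List.pyGetD lo i ' ') []).any
         (fun marker => marker.toList.isPrefixOf (lo.drop i.toNat)))
  then true
  else
    (decide (PySem.Str.len sentence > 220) && PySem.Str.isIn ";" sentence)
    || decide (PySem.Str.count lower " yes" ≥ 2)
    || decide (PySem.Str.count lower " no" ≥ 2)

-- ===== PRECONDITION & SPEC =====
def Spec_is_low_value_summary_sentence_py (sentence : String) (out : Bool) : Prop := out = is_low_value_summary_sentence_py_alt sentence
instance (sentence : String) (out : Bool) : Decidable (Spec_is_low_value_summary_sentence_py sentence out) := by unfold Spec_is_low_value_summary_sentence_py; infer_instance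

-- ===== CLAIM (what is proved, stated in full; the proofs are below) =====
def Claim_equal_is_low_value_summary_sentence_py : Prop := ∀ (sentence : String), Dom_is_low_value_summary_sentence_py sentence → Spec_is_low_value_summary_sentence_py sentence (is_low_value_summary_sentence_py sentence)

-- ===== LEMMAS AND PROOFS =====

-- the flat union of every marker A tests (proof-side only)
def pvAllMarkers : List String :=
  ["elected officials present", "city staff present", "present electronically",
   "council chambers", "page ", "city recorder",
   "recording of the discussion can be found", "parcel number", "is located directly",
   "roll call", "call to order", "pledge of allegiance", "joined the meeting",
   "was excused", "mayor pro tempore", "attendance",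
   "recording of the motion can be found", "seconded the motion", "the motion passed with"]

lemma pvBucket_subset (c : Char) (m : String) :
    m ∈ pvMarkersByFirst.getD c [] → m ∈ pvAllMarkers := by
  intro h
  unfold pvMarkersByFirst at h
  simp only [PySem.Dict.getD, PySem.Dict.get?, List.find?] at h
  repeat' split at h
  all_goals simp_all [pvAllMarkers] <;> tauto

lemma pvMarkers_in_bucket :
    ∀ m ∈ pvAllMarkers, m.toList ≠ [] ∧
      m ∈ pvMarkersByFirst.getD (m.toList.headD ' ') [] := by decide

lemma pvScan_eq_any (lo : List Char) :
    ((PySem.List.pyRange 0 lo.length 1).any (fun i =>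
       (pvMarkersByFirst.getD (PySem.List.pyGetD lo i ' ') []).any
         (fun marker => marker.toList.isPrefixOf (lo.drop i.toNat))))
    = pvAllMarkers.any (fun m => PySem.Chars.isIn m.toList lo) := by
  rw [Bool.eq_iff_iff]
  simp only [List.any_eq_true, List.isPrefixOf_iff_prefix]
  constructor
  · rintro ⟨i, hi, m, hm, hpref⟩
    exact ⟨m, pvBucket_subset _ _ hm,
      (PySem.Chars.exists_prefix_drop_iff_isIn _ _).1 ⟨i.toNat, hpref⟩⟩
  · rintro ⟨m, hm, hin⟩
    obtain ⟨j, hpref⟩ := (PySem.Chars.exists_prefix_drop_iff_isIn _ _).2 hin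
    obtain ⟨hne, hbucket⟩ := pvMarkers_in_bucket m hm
    have hj : j < lo.length := by
      by_contra h
      rw [List.drop_eq_nil_of_le (by omega)] at hpref
      exact hne (List.prefix_nil.mp hpref)
    refine ⟨(j : Int), ?_, m, ?_, ?_⟩
    · rw [PySem.List.mem_pyRange_iff_of_pos (by norm_num)]
      exact ⟨Int.natCast_nonneg j, by exact_mod_cast hj, one_dvd _⟩
    · -- lo[j] is the first character of the match, i.e. m's first character
      have hhead : (lo.drop j).head? = m.toList.head? := by
        obtain ⟨t, ht⟩ := hpref
        cases h : m.toList with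
        | nil => exact absurd h hne
        | cons a as => rw [← ht, h]; rfl
      have hget : PySem.List.pyGetD lo (j : Int) ' ' = m.toList.headD ' ' := by
        rw [PySem.List.pyGetD_natCast]
        rw [List.getD_eq_getElem?_getD, ← List.head?_drop, hhead]
        cases h : m.toList with
        | nil => exact absurd h hne
        | cons a as => rfl
      rw [hget]; exact hbucket
    · simpa [List.isPrefixOf_iff_prefix] using hpref

set_option maxHeartbeats 1000000 in
-- ===== VERDICT (by name: the statement is the Claim_ definition above) =====
theorem is_low_value_summary_sentence_py_spec : Claim_equal_is_low_value_summary_sentence_py := by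
  intro sentence _
  unfold Spec_is_low_value_summary_sentence_py is_low_value_summary_sentence_py
    is_low_value_summary_sentence_py_alt pvIsLowSignalSentence pvIsMeetingOperationsSentence
    pvIsLowValueOutcome pvMeetingOperationsMarkers
  simp only [List.any_cons, List.any_nil, Bool.or_false, Bool.if_true_left, Bool.if_false_right,
    Bool.decide_eq_true, Bool.and_true, PySem.Str.isIn_eq, PySem.Str.toList_lower]
  simp only [pvScan_eq_any]
  simp only [pvAllMarkers, List.any_cons, List.any_nil, Bool.or_false]
  generalize PySem.Chars.lower sentence.toList = lo
  generalize (decide (PySem.Str.len sentence > 220) && PySem.Chars.isIn ";".toList sentence.toList) = L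
  generalize decide (PySem.Str.count (PySem.Str.lower sentence) " yes" ≥ 2) = Y
  generalize decide (PySem.Str.count (PySem.Str.lower sentence) " no" ≥ 2) = N
  generalize PySem.Chars.isIn "elected officials present".toList lo = a0
  generalize PySem.Chars.isIn "city staff present".toList lo = a1
  generalize PySem.Chars.isIn "present electronically".toList lo = a2
  generalize PySem.Chars.isIn "council chambers".toList lo = a3
  generalize PySem.Chars.isIn "page ".toList lo = a4
  generalize PySem.Chars.isIn "city recorder".toList lo = a5
  generalize PySem.Chars.isIn "recording of the discussion can be found".toList lo = a6
  generalize PySem.Chars.isIn "parcel number".toList lo = a7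
  generalize PySem.Chars.isIn "is located directly".toList lo = a8
  generalize PySem.Chars.isIn "roll call".toList lo = a9
  generalize PySem.Chars.isIn "call to order".toList lo = a10
  generalize PySem.Chars.isIn "pledge of allegiance".toList lo = a11
  generalize PySem.Chars.isIn "joined the meeting".toList lo = a12
  generalize PySem.Chars.isIn "was excused".toList lo = a13
  generalize PySem.Chars.isIn "mayor pro tempore".toList lo = a14
  generalize PySem.Chars.isIn "attendance".toList lo = a15
  generalize PySem.Chars.isIn "recording of the motion can be found".toList lo = a16
  generalize PySem.Chars.isIn "seconded the motion".toList lo = a17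
  generalize PySem.Chars.isIn "the motion passed with".toList lo = a18
  simp only [Bool.or_assoc]
  simp only [Bool.or_comm, Bool.or_left_comm, Bool.or_self, Bool.or_self_left]
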